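-- pv_equiv track=rewrite | github.com/ZhiyuanChen/DanLing | danling/runner/abstract_runner.py | _add_indent
-- ===== SOURCE A (Python) =====
-- def _add_indent(s):
--     st = s.split("\n")
--     # don't do anything for single-line stuff
--     if len(st) == 1:
--         return s
--     first = st.pop(0)
--     st = [(2 * " ") + line for line in st]  # hardcode indent to 2
--     st = "\n".join(st)
--     st = first + "\n" + st
--     return st
-- ===== SOURCE B (Python) =====
-- def _add_indent(s):
--     # indent every line except the first by two spaces, via one whole-string substitution
--     return s.replace("\n", "\n  ")
-- ===== Notes on version B (the rewrite author's own statement) =====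
-- stated objective: simpler
-- what changed: Replaces the split/pop/per-line-prepend/join pipeline (with its single-line special case) by one whole-string substitution that rewrites each newline into a newline followed by two spaces.
import Mathlib
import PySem

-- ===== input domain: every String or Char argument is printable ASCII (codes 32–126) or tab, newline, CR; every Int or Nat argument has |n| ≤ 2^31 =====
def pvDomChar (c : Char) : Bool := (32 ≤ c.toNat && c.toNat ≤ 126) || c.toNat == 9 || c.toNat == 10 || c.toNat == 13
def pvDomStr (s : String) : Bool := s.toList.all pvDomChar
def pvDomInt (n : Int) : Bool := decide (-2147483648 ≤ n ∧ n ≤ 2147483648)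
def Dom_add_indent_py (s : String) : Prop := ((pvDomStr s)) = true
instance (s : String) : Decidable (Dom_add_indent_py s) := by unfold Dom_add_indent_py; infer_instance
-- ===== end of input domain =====

-- B replaces A's split/pop/per-line-indent/join pipeline by one whole-string
-- substitution rewriting each newline into newline-plus-two-spaces (objective: simpler).

-- ===== PORT A =====
-- literal transliteration of A, working on the code-point list (PySem.Chars is
-- the exact model of Python str operations; String.ofList wraps the result back)
def add_indent_py (s : String) : String :=
  let st := PySem.Chars.splitOn s.toList ['\n']          -- st = s.split("\n")
  if st.length = 1 then s                                 -- single-line: return s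
  else
    match st with
    | [] => s                                             -- unreachable: split never returns []
    | first :: rest =>                                    -- first = st.pop(0)
      let st2 := rest.map (fun line => [' ', ' '] ++ line) -- [(2*" ") + line for line in st]
      let joined := PySem.Chars.join ['\n'] st2            -- "\n".join(st)
      String.ofList (first ++ ['\n'] ++ joined)                -- first + "\n" + st

-- ===== PORT B =====
def add_indent_py_alt (s : String) : String :=
  PySem.Str.replace s "\n" "\n  "

-- ===== PRECONDITION & SPEC =====
def Spec_add_indent_py (s : String) (out : String) : Prop := out = add_indent_py_alt s
instance (s : String) (out : String) : Decidable (Spec_add_indent_py s out) := by unfold Spec_add_indent_py; infer_instance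

-- ===== CLAIM (what is proved, stated in full; the proofs are below) =====
def Claim_equal_add_indent_py : Prop := ∀ (s : String), Dom_add_indent_py s → Spec_add_indent_py s (add_indent_py s)

-- ===== LEMMAS AND PROOFS =====

-- reference splitter: s.split("\n") as a plain structural recursion
def splitNL : List Char → List (List Char)
  | [] => [[]]
  | c :: t => if c = '\n' then [] :: splitNL t else (splitNL t).modifyHead (c :: ·)

theorem splitNL_ne_nil (l : List Char) : splitNL l ≠ [] := by
  cases l with
  | nil => simp [splitNL]
  | cons c t =>
    simp only [splitNL]
    split_ifs <;> simp [List.modifyHead]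
    cases h : splitNL t with
    | nil => exact absurd h (splitNL_ne_nil t)
    | cons a b => simp

-- intercalate over a two-or-more-element list, one step
theorem intercalate_cc (s a b : List Char) (l : List (List Char)) :
    s.intercalate (a :: b :: l) = a ++ s ++ s.intercalate (b :: l) := by
  simp [List.intercalate]

theorem splitOn_go_spec : ∀ (fuel : Nat) (l cur : List Char) (acc : List (List Char)),
    l.length ≤ fuel →
    PySem.Chars.splitOn.go ['\n'] fuel l cur acc
      = acc.reverse ++ (splitNL l).modifyHead (cur.reverse ++ ·) := by
  intro fuel
  induction fuel with
  | zero =>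
    intro l cur acc h
    have : l = [] := List.eq_nil_of_length_eq_zero (Nat.le_zero.mp h)
    subst this
    simp [PySem.Chars.splitOn.go, splitNL]
  | succ n ih =>
    intro l cur acc h
    cases l with
    | nil => simp [PySem.Chars.splitOn.go, splitNL]
    | cons c t =>
      simp only [PySem.Chars.splitOn.go, splitNL]
      by_cases hc : c = '\n'
      · subst hc
        simp only [List.isPrefixOf, BEq.rfl, Bool.true_and, if_pos,
          List.length_singleton, List.drop_one, List.tail_cons]
        rw [ih t [] _ (by simpa using Nat.le_of_succ_le_succ h)]
        cases splitNL t <;> simp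
      · have hpre : (['\n'].isPrefixOf (c :: t)) = false := by
          simp [List.isPrefixOf]
          intro hx; exact absurd hx.symm hc
        rw [if_neg (by simp [hpre]), ih t (c :: cur) acc (Nat.le_of_succ_le_succ h)]
        simp [hc]
        cases hs : splitNL t with
        | nil => exact absurd hs (splitNL_ne_nil t)
        | cons a b => simp

theorem splitOn_eq_splitNL (l : List Char) :
    PySem.Chars.splitOn l ['\n'] = splitNL l := by
  unfold PySem.Chars.splitOn
  rw [splitOn_go_spec (l.length + 1) l [] [] (Nat.le_succ _)]
  cases hs : splitNL l with
  | nil => exact absurd hs (splitNL_ne_nil l)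
  | cons a b => simp

theorem replace_go_spec : ∀ (fuel : Nat) (l acc : List Char),
    l.length ≤ fuel →
    PySem.Chars.replace.go ['\n'] ['\n', ' ', ' '] fuel l acc
      = acc.reverse ++ List.intercalate ['\n', ' ', ' '] (splitNL l) := by
  intro fuel
  induction fuel with
  | zero =>
    intro l acc h
    have : l = [] := List.eq_nil_of_length_eq_zero (Nat.le_zero.mp h)
    subst this
    simp [PySem.Chars.replace.go, splitNL, List.intercalate]
  | succ n ih =>
    intro l acc h
    cases l with
    | nil => simp [PySem.Chars.replace.go, splitNL, List.intercalate]
    | cons c t =>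
      simp only [PySem.Chars.replace.go, splitNL]
      by_cases hc : c = '\n'
      · subst hc
        simp only [List.isPrefixOf, BEq.rfl, Bool.true_and, if_pos,
          List.length_singleton, List.drop_one, List.tail_cons]
        rw [ih t _ (Nat.le_of_succ_le_succ h)]
        cases hs : splitNL t with
        | nil => exact absurd hs (splitNL_ne_nil t)
        | cons a b => simp [intercalate_cc]
      · have hpre : (['\n'].isPrefixOf (c :: t)) = false := by
          simp [List.isPrefixOf]
          intro hx; exact absurd hx.symm hc
        rw [if_neg (by simp [hpre]), ih t (c :: acc) (Nat.le_of_succ_le_succ h)]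
        simp [hc]
        cases hs : splitNL t with
        | nil => exact absurd hs (splitNL_ne_nil t)
        | cons a b =>
          cases b with
          | nil => simp [List.intercalate]
          | cons b1 b2 => simp [intercalate_cc]

theorem replace_eq_intercalate (l : List Char) :
    PySem.Chars.replace l ['\n'] ['\n', ' ', ' ']
      = List.intercalate ['\n', ' ', ' '] (splitNL l) := by
  unfold PySem.Chars.replace
  rw [if_neg (by simp)]
  exact replace_go_spec l.length l [] (Nat.le_refl _)

-- joining the split back with "\n" recovers the string
theorem intercalate_splitNL (l : List Char) :
    List.intercalate ['\n'] (splitNL l) = l := by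
  induction l with
  | nil => simp [splitNL, List.intercalate]
  | cons c t ih =>
    simp only [splitNL]
    by_cases hc : c = '\n'
    · subst hc
      rw [if_pos rfl]
      cases hs : splitNL t with
      | nil => exact absurd hs (splitNL_ne_nil t)
      | cons a b =>
        rw [hs] at ih
        simp [intercalate_cc, ih]
    · rw [if_neg hc]
      cases hs : splitNL t with
      | nil => exact absurd hs (splitNL_ne_nil t)
      | cons a b =>
        rw [hs] at ih
        cases b with
        | nil => simpa [List.intercalate] using congrArg (c :: ·) ih
        | cons b1 b2 =>
          simp only [List.modifyHead, intercalate_cc] at ih ⊢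
          exact congrArg (c :: ·) ih

-- intercalating with "\n  " = first line, then "\n", then the indented rest joined by "\n"
theorem intercalate_indent (first : List Char) (rest : List (List Char)) (h : rest ≠ []) :
    List.intercalate ['\n', ' ', ' '] (first :: rest)
      = first ++ ['\n'] ++ List.intercalate ['\n'] (rest.map (fun line => [' ', ' '] ++ line)) := by
  induction rest generalizing first with
  | nil => exact absurd rfl h
  | cons r rs ih =>
    cases rs with
    | nil => simp [List.intercalate]
    | cons r1 rs1 =>
      have hstep := ih r (by simp)
      rw [intercalate_cc, hstep]
      simp [intercalate_cc]

-- ===== VERDICT (by name: the statement is the Claim_ definition above) =====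
theorem add_indent_py_spec : Claim_equal_add_indent_py := by
  intro s _
  unfold Spec_add_indent_py add_indent_py add_indent_py_alt
  have hB : (PySem.Str.replace s "\n" "\n  ").toList
      = List.intercalate ['\n', ' ', ' '] (splitNL s.toList) := by
    rw [PySem.Str.toList_replace]
    simpa using replace_eq_intercalate s.toList
  cases hs : splitNL s.toList with
  | nil => exact absurd hs (splitNL_ne_nil _)
  | cons first rest =>
    simp only [splitOn_eq_splitNL, hs]
    cases rest with
    | nil =>
      rw [if_pos (by simp)]
      apply String.toList_inj.mp
      rw [hB, hs]
      conv_lhs => rw [← intercalate_splitNL s.toList, hs]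
      simp [List.intercalate]
    | cons r rs =>
      rw [if_neg (by simp)]
      apply String.toList_inj.mp
      rw [String.toList_ofList, hB, hs, intercalate_indent first (r :: rs) (by simp)]
      rfl
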